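-- pv_equiv track=rewrite | github.com/helight59/hel-zapret-ui | src/cli/bat_cmdline.py | split_windows_cmdline
-- ===== SOURCE A (Python) =====
-- def split_windows_cmdline(s: str) -> list[str]:
--     out: list[str] = []
--     cur = ''
--     q = False
--     i = 0
--     while i < len(s):
--         ch = s[i]
--         if ch == '"':
--             q = not q
--             i += 1
--             continue
--         if (not q) and ch.isspace():
--             if cur:
--                 out.append(cur)
--                 cur = ''
--             i += 1
--             while i < len(s) and s[i].isspace():
--                 i += 1
--             continue
--         cur += ch
--         i += 1
--     if cur:
--         out.append(cur)
--     return out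
-- ===== SOURCE B (Python) =====
-- def split_windows_cmdline(s: str) -> list[str]:
--     parts = s.split('"')
--     out: list[str] = []
--     cur = ''
--     for k, part in enumerate(parts):
--         if k % 2 == 1:
--             cur += part
--             continue
--         if part and part[0].isspace():
--             if cur:
--                 out.append(cur)
--             cur = ''
--         words = part.split()
--         if words:
--             cur += words[0]
--             for w in words[1:]:
--                 out.append(cur)
--                 cur = w
--         if part and part[-1].isspace():
--             if cur:
--                 out.append(cur)
--             cur = ''
--     if cur:
--         out.append(cur)
--     return out
-- ===== Notes on version B (the rewrite author's own statement) =====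
-- stated objective: faster
-- what changed: Replaced A's per-character index loop with quote flag and inner whitespace-skip loop by a decomposition via str.split on the double-quote character: odd-index parts (quoted text) are appended verbatim to the pending token, even-index parts are whitespace-split with flushes at their leading/trailing whitespace.
import Mathlib
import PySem

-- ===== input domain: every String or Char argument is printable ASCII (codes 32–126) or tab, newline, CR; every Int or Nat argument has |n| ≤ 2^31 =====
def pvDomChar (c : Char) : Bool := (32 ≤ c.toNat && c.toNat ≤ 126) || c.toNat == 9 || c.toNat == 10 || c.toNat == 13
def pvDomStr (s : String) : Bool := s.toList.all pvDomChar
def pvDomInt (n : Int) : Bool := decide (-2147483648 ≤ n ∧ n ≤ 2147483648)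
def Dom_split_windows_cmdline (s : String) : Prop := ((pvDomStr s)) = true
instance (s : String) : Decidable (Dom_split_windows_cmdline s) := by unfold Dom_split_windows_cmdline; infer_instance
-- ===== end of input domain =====

-- B replaces A's per-character quote/space state machine by splitting on the double-quote character:
-- even parts are whitespace-split, odd (quoted) parts are appended verbatim; same return value.

-- ===== PORT A =====
-- inner `while i < len(s) and s[i].isspace(): i += 1` loop of A
def pvSkip : List Char → List Char
  | [] => []
  | c :: t => if PySem.Chars.isspace c then pvSkip t else c :: t

theorem pvSkip_length_le (l : List Char) : (pvSkip l).length ≤ l.length := by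
  induction l with
  | nil => simp [pvSkip]
  | cons c t ih =>
    simp only [pvSkip]
    split
    · exact le_trans ih (by simp)
    · exact le_rfl

-- A's main while loop: state (cur, q); `out` is the list being returned
def pvALoop : List Char → List Char → Bool → List (List Char)
  | [], cur, _ => if cur = [] then [] else [cur]
  | c :: t, cur, q =>
    if c = '"' then pvALoop t cur (!q)
    else if !q && PySem.Chars.isspace c then
      (if cur = [] then [] else [cur]) ++ pvALoop (pvSkip t) [] q
    else pvALoop t (cur ++ [c]) q
  termination_by l _ _ => l.length
  decreasing_by
    · simp
    · have := pvSkip_length_le t; simp; omega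
    · simp

def split_windows_cmdline (s : String) : List String :=
  (pvALoop s.toList [] false).map String.ofList

-- ===== PORT B =====
-- `if cur: out.append(cur)` step shared by Source B's flushes
def pvEmit (cur : List Char) : List (List Char) := if cur = [] then [] else [cur]

-- s.split('"')
def pvSplitQ : List Char → List (List Char)
  | [] => [[]]
  | c :: t =>
    if c = '"' then [] :: pvSplitQ t
    else
      match pvSplitQ t with
      | [] => [[c]]
      | p :: ps => (c :: p) :: ps

-- part.split()  (Python whitespace split, no empty words)
def pvWords : List Char → List (List Char)
  | [] => []
  | c :: t =>
    if PySem.Chars.isspace c then pvWords t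
    else (c :: t.takeWhile (fun d => !PySem.Chars.isspace d)) ::
         pvWords (t.dropWhile (fun d => !PySem.Chars.isspace d))
  termination_by l => l.length
  decreasing_by
    · simp
    · have := List.length_dropWhile_le (fun d => !PySem.Chars.isspace d) t; simp; omega

-- `for w in words[1:]: out.append(cur); cur = w`
def pvMerge (cur : List Char) : List (List Char) → List (List Char) × List Char
  | [] => ([], cur)
  | w :: rest => ((cur :: (pvMerge w rest).1), (pvMerge w rest).2)

-- part and part[0].isspace()
def pvHeadWs : List Char → Bool
  | [] => false
  | c :: _ => PySem.Chars.isspace c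

-- part and part[-1].isspace()
def pvLastWs (p : List Char) : Bool :=
  match p.getLast? with
  | none => false
  | some c => PySem.Chars.isspace c

-- body of Source B's loop for one even-index part: (tokens appended to out, new cur)
def pvProcEven (cur p : List Char) : List (List Char) × List Char :=
  let s1 : List (List Char) × List Char :=
    if pvHeadWs p then (pvEmit cur, []) else ([], cur)
  let s2 : List (List Char) × List Char :=
    match pvWords p with
    | [] => ([], s1.2)
    | w :: rest => pvMerge (s1.2 ++ w) rest
  let s3 : List (List Char) × List Char :=
    if pvLastWs p then (pvEmit s2.2, []) else ([], s2.2)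
  (s1.1 ++ s2.1 ++ s3.1, s3.2)

-- Source B's `for k, part in enumerate(parts)` loop; `odd` = k % 2 == 1
def pvBLoop : List (List Char) → Bool → List Char → List (List Char)
  | [], _, cur => pvEmit cur
  | p :: ps, odd, cur =>
    if odd then pvBLoop ps false (cur ++ p)
    else (pvProcEven cur p).1 ++ pvBLoop ps true (pvProcEven cur p).2

def split_windows_cmdline_alt (s : String) : List String :=
  (pvBLoop (pvSplitQ s.toList) false []).map String.ofList

-- ===== PRECONDITION & SPEC =====
def Spec_split_windows_cmdline (s : String) (out : List String) : Prop := out = split_windows_cmdline_alt s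
instance (s : String) (out : List String) : Decidable (Spec_split_windows_cmdline s out) := by unfold Spec_split_windows_cmdline; infer_instance

-- ===== CLAIM (what is proved, stated in full; the proofs are below) =====
def Claim_equal_split_windows_cmdline : Prop := ∀ (s : String), Dom_split_windows_cmdline s → Spec_split_windows_cmdline s (split_windows_cmdline s)

-- ===== LEMMAS AND PROOFS =====

-- mid-level reference: A's loop without the redundant inner whitespace-skip
def pvG : List Char → List Char → Bool → List (List Char)
  | [], cur, _ => pvEmit cur
  | c :: t, cur, q =>
    if c = '"' then pvG t cur (!q)
    else if !q && PySem.Chars.isspace c then pvEmit cur ++ pvG t [] q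
    else pvG t (cur ++ [c]) q

theorem pvG_skip (t : List Char) : pvG (pvSkip t) [] false = pvG t [] false := by
  induction t with
  | nil => simp [pvSkip]
  | cons c t ih =>
    simp only [pvSkip]
    by_cases hc : PySem.Chars.isspace c = true
    · have hq : c ≠ '"' := by rintro rfl; exact absurd hc (by decide)
      rw [if_pos hc, ih]
      simp [pvG, hq, hc, pvEmit]
    · rw [if_neg hc]

theorem pvALoop_eq_pvG_aux (n : Nat) :
    ∀ l : List Char, l.length ≤ n → ∀ cur q, pvALoop l cur q = pvG l cur q := by
  induction n with
  | zero =>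
    intro l hl cur q
    have : l = [] := by cases l <;> simp_all
    subst this
    simp [pvALoop, pvG, pvEmit]
  | succ n ih =>
    intro l hl cur q
    cases l with
    | nil => simp [pvALoop, pvG, pvEmit]
    | cons c t =>
      have ht : t.length ≤ n := by simp at hl; omega
      by_cases hc : c = '"'
      · subst hc
        simp only [pvALoop, pvG]
        exact ih t ht cur (!q)
      · by_cases hw : (!q && PySem.Chars.isspace c) = true
        · have hq : q = false := by cases q <;> simp_all
          subst hq
          simp only [pvALoop, pvG, if_neg hc, hw, if_pos]
          have hsk : (pvSkip t).length ≤ n :=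
            le_trans (pvSkip_length_le t) ht
          rw [ih (pvSkip t) hsk [] false, pvG_skip, pvEmit]
        · simp only [pvALoop, pvG, if_neg hc, hw, Bool.false_eq_true, if_false]
          exact ih t ht (cur ++ [c]) q

theorem pvALoop_eq_pvG (l cur : List Char) (q : Bool) : pvALoop l cur q = pvG l cur q :=
  pvALoop_eq_pvG_aux l.length l le_rfl cur q

theorem pvWords_nil_all (l : List Char) (h : pvWords l = []) :
    ∀ c ∈ l, PySem.Chars.isspace c = true := by
  induction l with
  | nil => simp
  | cons c t ih =>
    by_cases hc : PySem.Chars.isspace c = true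
    · simp only [pvWords, if_pos hc] at h
      intro x hx
      rcases List.mem_cons.1 hx with h' | h'
      · subst h'; exact hc
      · exact ih h x h'
    · simp [pvWords, hc] at h

theorem pvLastWs_of_nil_words (l : List Char) (hne : l ≠ []) (h : pvWords l = []) :
    pvLastWs l = true := by
  have hsome : l.getLast? = some (l.getLast hne) := List.getLast?_eq_some_getLast hne
  have hmem : l.getLast hne ∈ l := List.getLast_mem hne
  simp [pvLastWs, hsome, pvWords_nil_all l h _ hmem]

theorem pvProcEven_ws (c : Char) (p cur : List Char) (h : PySem.Chars.isspace c = true) :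
    pvProcEven cur (c :: p) = (pvEmit cur ++ (pvProcEven [] p).1, (pvProcEven [] p).2) := by
  cases p with
  | nil => simp [pvProcEven, pvHeadWs, pvLastWs, pvWords, pvEmit, h]
  | cons d p' =>
    have hlast : pvLastWs (c :: d :: p') = pvLastWs (d :: p') := by
      simp [pvLastWs, List.getLast?_cons_cons]
    have hw : pvWords (c :: d :: p') = pvWords (d :: p') := by
      simp [pvWords, h]
    have hs1 : (if pvHeadWs (d :: p') then (pvEmit ([] : List Char), ([] : List Char))
        else (([] : List (List Char)), ([] : List Char))) = ([], []) := by
      split <;> simp [pvEmit]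
    simp only [pvProcEven, pvHeadWs, h, if_pos, hlast, hw]
    cases hws : pvWords (d :: p') <;>
      cases hl : pvLastWs (d :: p') <;>
      simp [pvEmit]

theorem pvProcEven_cons (c : Char) (p cur : List Char) (h : PySem.Chars.isspace c = false) :
    pvProcEven cur (c :: p) = pvProcEven (cur ++ [c]) p := by
  have hh : pvHeadWs (c :: p) = false := by simp [pvHeadWs, h]
  cases p with
  | nil => simp [pvProcEven, pvHeadWs, pvLastWs, pvWords, pvMerge, h]
  | cons d p' =>
    have hlast : pvLastWs (c :: d :: p') = pvLastWs (d :: p') := by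
      simp [pvLastWs, List.getLast?_cons_cons]
    by_cases hd : PySem.Chars.isspace d = true
    · have hw : pvWords (c :: d :: p') = [c] :: pvWords (d :: p') := by
        simp [pvWords, h, hd]
      cases hws : pvWords (d :: p') with
      | nil =>
        have hall : pvLastWs (d :: p') = true :=
          pvLastWs_of_nil_words _ (by simp) hws
        simp [pvProcEven, pvHeadWs, hlast, hall, hw, hws, hd, h, pvMerge, pvEmit]
      | cons w r =>
        simp [pvProcEven, pvHeadWs, hlast, hw, hws, hd, h, pvMerge, pvEmit]
    · have hd' : PySem.Chars.isspace d = false := by simpa using hd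
      have hw : pvWords (c :: d :: p')
          = (c :: d :: p'.takeWhile (fun x => !PySem.Chars.isspace x)) ::
            pvWords (p'.dropWhile (fun x => !PySem.Chars.isspace x)) := by
        simp [pvWords, h, hd']
      have hw2 : pvWords (d :: p')
          = (d :: p'.takeWhile (fun x => !PySem.Chars.isspace x)) ::
            pvWords (p'.dropWhile (fun x => !PySem.Chars.isspace x)) := by
        simp [pvWords, hd']
      simp [pvProcEven, pvHeadWs, hd', hlast, hw, hw2, h, pvEmit]

theorem pvG_even_end (p : List Char) (hp : ∀ c ∈ p, c ≠ '"') (cur : List Char) :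
    pvG p cur false = (pvProcEven cur p).1 ++ pvEmit (pvProcEven cur p).2 := by
  induction p generalizing cur with
  | nil => simp [pvG, pvProcEven, pvHeadWs, pvLastWs, pvWords]
  | cons c p ih =>
    have hc : c ≠ '"' := hp c (by simp)
    have hp' : ∀ x ∈ p, x ≠ '"' := fun x hx => hp x (by simp [hx])
    by_cases hs : PySem.Chars.isspace c = true
    · rw [pvProcEven_ws c p cur hs]
      simp only [pvG, if_neg hc, hs, Bool.not_false, Bool.true_and, if_pos]
      rw [ih hp']
      simp [List.append_assoc]
    · have hs' : PySem.Chars.isspace c = false := by simpa using hs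
      rw [pvProcEven_cons c p cur hs']
      simp only [pvG, if_neg hc, hs', Bool.not_false, Bool.true_and, Bool.false_eq_true,
        if_false]
      exact ih hp' (cur ++ [c])

theorem pvG_even_quote (p : List Char) (hp : ∀ c ∈ p, c ≠ '"') (l' cur : List Char) :
    pvG (p ++ '"' :: l') cur false
      = (pvProcEven cur p).1 ++ pvG l' (pvProcEven cur p).2 true := by
  induction p generalizing cur with
  | nil => simp [pvG, pvProcEven, pvHeadWs, pvLastWs, pvWords]
  | cons c p ih =>
    have hc : c ≠ '"' := hp c (by simp)
    have hp' : ∀ x ∈ p, x ≠ '"' := fun x hx => hp x (by simp [hx])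
    rw [List.cons_append]
    by_cases hs : PySem.Chars.isspace c = true
    · rw [pvProcEven_ws c p cur hs]
      simp only [pvG, if_neg hc, hs, Bool.not_false, Bool.true_and, if_pos]
      rw [ih hp']
      simp [List.append_assoc]
    · have hs' : PySem.Chars.isspace c = false := by simpa using hs
      rw [pvProcEven_cons c p cur hs']
      simp only [pvG, if_neg hc, hs', Bool.not_false, Bool.true_and, Bool.false_eq_true,
        if_false]
      exact ih hp' (cur ++ [c])

theorem pvG_odd_end (p : List Char) (hp : ∀ c ∈ p, c ≠ '"') (cur : List Char) :
    pvG p cur true = pvEmit (cur ++ p) := by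
  induction p generalizing cur with
  | nil => simp [pvG]
  | cons c p ih =>
    have hc : c ≠ '"' := hp c (by simp)
    have hp' : ∀ x ∈ p, x ≠ '"' := fun x hx => hp x (by simp [hx])
    simp only [pvG, if_neg hc, Bool.not_true, Bool.false_and, Bool.false_eq_true, if_false]
    rw [ih hp']
    simp

theorem pvG_odd_quote (p : List Char) (hp : ∀ c ∈ p, c ≠ '"') (l' cur : List Char) :
    pvG (p ++ '"' :: l') cur true = pvG l' (cur ++ p) false := by
  induction p generalizing cur with
  | nil => simp [pvG]
  | cons c p ih =>
    have hc : c ≠ '"' := hp c (by simp)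
    have hp' : ∀ x ∈ p, x ≠ '"' := fun x hx => hp x (by simp [hx])
    rw [List.cons_append]
    simp only [pvG, if_neg hc, Bool.not_true, Bool.false_and, Bool.false_eq_true, if_false]
    rw [ih hp']
    simp

def pvJoinQ : List (List Char) → List Char
  | [] => []
  | [p] => p
  | p :: q :: ps => p ++ '"' :: pvJoinQ (q :: ps)

theorem pvSplitQ_ne_nil (l : List Char) : pvSplitQ l ≠ [] := by
  intro h
  cases l with
  | nil => simp [pvSplitQ] at h
  | cons c t =>
    simp only [pvSplitQ] at h
    split at h
    · simp at h
    · split at h <;> simp_all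

theorem pvJoinQ_splitQ (l : List Char) : pvJoinQ (pvSplitQ l) = l := by
  induction l with
  | nil => rfl
  | cons c t ih =>
    obtain ⟨p, ps, hps⟩ := List.exists_cons_of_ne_nil (pvSplitQ_ne_nil t)
    rw [hps] at ih
    by_cases hc : c = '"'
    · subst hc
      simp only [pvSplitQ, hps]
      simpa [pvJoinQ] using ih
    · simp only [pvSplitQ, if_neg hc, hps]
      cases ps with
      | nil => simpa [pvJoinQ] using ih
      | cons q ps' => simpa [pvJoinQ] using ih

theorem pvSplitQ_no_quote (l : List Char) : ∀ p ∈ pvSplitQ l, ∀ c ∈ p, c ≠ '"' := by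
  induction l with
  | nil => simp [pvSplitQ]
  | cons c t ih =>
    by_cases hc : c = '"'
    · subst hc
      simp only [pvSplitQ]
      intro p hp x hx
      rcases List.mem_cons.1 hp with h | h
      · subst h; simp at hx
      · exact ih p h x hx
    · obtain ⟨p, ps, hps⟩ := List.exists_cons_of_ne_nil (pvSplitQ_ne_nil t)
      simp only [pvSplitQ, if_neg hc, hps]
      intro p' hp' x hx
      rcases List.mem_cons.1 hp' with h | h
      · subst h
        rcases List.mem_cons.1 hx with h' | h'
        · subst h'; exact hc
        · exact ih p (hps ▸ List.mem_cons_self) x h'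
      · exact ih p' (hps ▸ List.mem_cons_of_mem _ h) x hx

theorem pvG_joinQ : ∀ parts : List (List Char), (∀ p ∈ parts, ∀ c ∈ p, c ≠ '"') →
    parts ≠ [] → ∀ cur : List Char,
    pvG (pvJoinQ parts) cur false = pvBLoop parts false cur ∧
    pvG (pvJoinQ parts) cur true = pvBLoop parts true cur := by
  intro parts
  induction parts with
  | nil => intro _ h; exact absurd rfl h
  | cons p ps ih =>
    intro hq _ cur
    have hp : ∀ c ∈ p, c ≠ '"' := hq p (by simp)
    cases ps with
    | nil =>
      constructor
      · rw [show pvJoinQ [p] = p from rfl, pvG_even_end p hp cur]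
        simp [pvBLoop]
      · rw [show pvJoinQ [p] = p from rfl, pvG_odd_end p hp cur]
        simp [pvBLoop]
    | cons q ps' =>
      have ihq := ih (fun p' h => hq p' (List.mem_cons_of_mem _ h)) (by simp)
      constructor
      · rw [show pvJoinQ (p :: q :: ps') = p ++ '"' :: pvJoinQ (q :: ps') from rfl,
          pvG_even_quote p hp _ cur, (ihq _).2]
        simp [pvBLoop]
      · rw [show pvJoinQ (p :: q :: ps') = p ++ '"' :: pvJoinQ (q :: ps') from rfl,
          pvG_odd_quote p hp _ cur, (ihq _).1]
        simp [pvBLoop]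

-- ===== VERDICT (by name: the statement is the Claim_ definition above) =====
theorem split_windows_cmdline_spec : Claim_equal_split_windows_cmdline := by
  intro s _
  unfold Spec_split_windows_cmdline split_windows_cmdline split_windows_cmdline_alt
  have h := (pvG_joinQ (pvSplitQ s.toList) (pvSplitQ_no_quote s.toList)
    (pvSplitQ_ne_nil s.toList) []).1
  have h2 : pvG s.toList [] false = pvBLoop (pvSplitQ s.toList) false [] := by
    conv_lhs => rw [← pvJoinQ_splitQ s.toList]
    exact h
  rw [pvALoop_eq_pvG, h2]
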